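-- pv_equiv track=rewrite | github.com/alexandraback/datacollection | solutions_5634697451274240_1/Python/naruaway/main.py | solve
-- ===== SOURCE A (Python) =====
-- def solve(s):
--     i = len(s) - 1
--     while i >= 0 and s[i] == '+':
--         i -= 1
--     if i < 0:
--         return 0
--
--     answer = 1
--     c = s[i]
--     while i >= 0:
--         if c != s[i]:
--             answer += 1
--             c = s[i]
--         i -= 1
--     return answer
-- ===== SOURCE B (Python) =====
-- def solve(s):
--     # Compress s into its run-heads (a stack of first characters of maximal
--     # equal runs), then drop the trailing '+' run head if present.
--     comp = []
--     for ch in s: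
--         if comp[-1:] != [ch]:
--             comp.append(ch)
--     if comp[-1:] == ['+']:
--         comp.pop()
--     return len(comp)
-- ===== Notes on version B (the rewrite author's own statement) =====
-- stated objective: alternative
-- what changed: Replaced A's two backwards index-walk loops (manual trailing-'+' strip, then previous-char transition counting) with a forward fold that builds an explicit run-head stack (one entry per maximal equal run), pops the trailing '+' head, and returns the stack's length.
import Mathlib
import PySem

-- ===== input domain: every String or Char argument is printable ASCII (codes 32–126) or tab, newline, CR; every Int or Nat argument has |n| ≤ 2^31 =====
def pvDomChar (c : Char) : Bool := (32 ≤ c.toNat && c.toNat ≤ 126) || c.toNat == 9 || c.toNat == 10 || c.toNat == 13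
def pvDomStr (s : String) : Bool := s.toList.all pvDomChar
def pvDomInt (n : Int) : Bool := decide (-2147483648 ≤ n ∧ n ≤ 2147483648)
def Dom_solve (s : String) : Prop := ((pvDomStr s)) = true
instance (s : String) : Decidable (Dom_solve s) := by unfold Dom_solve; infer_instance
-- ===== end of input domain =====

-- B replaces A's two backwards index-walk loops with a forward fold building an explicit
-- run-head stack, popping a trailing '+' head (alternative decomposition, same cost).

-- ===== PORT A =====
-- first while loop: while i >= 0 and s[i] == '+': i -= 1 ; fuel n = i + 1
def solveStrip (l : List Char) : Nat → Int
  | 0 => -1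
  | n + 1 => if PySem.List.pyGet? l (n : Int) = some '+' then solveStrip l n else (n : Int)

-- second while loop with state (c, answer); fuel n = i + 1 (pyGet? is always some here)
def solveCount (l : List Char) (c : Char) (ans : Int) : Nat → Int
  | 0 => ans
  | n + 1 =>
    match PySem.List.pyGet? l (n : Int) with
    | none => ans
    | some x => if c ≠ x then solveCount l x (ans + 1) n else solveCount l c ans n

def solve (s : String) : Int :=
  let l := s.toList
  let i := solveStrip l l.length
  if i < 0 then 0
  else
    match PySem.List.pyGet? l i with
    | none => 0
    | some c => solveCount l c 1 (i.toNat + 1)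

-- ===== PORT B =====
-- one fold step: push ch unless it equals the top of the run-head stack
def compressStep (acc : List Char) (ch : Char) : List Char :=
  if acc.getLast? = some ch then acc else acc ++ [ch]

def solve_alt (s : String) : Int :=
  let comp := s.toList.foldl compressStep []
  let comp' := if comp.getLast? = some '+' then comp.dropLast else comp
  (comp'.length : Int)

-- ===== PRECONDITION & SPEC =====
def Spec_solve (s : String) (out : Int) : Prop := out = solve_alt s
instance (s : String) (out : Int) : Decidable (Spec_solve s out) := by unfold Spec_solve; infer_instance

-- ===== CLAIM (what is proved, stated in full; the proofs are below) =====
def Claim_equal_solve : Prop := ∀ (s : String), Dom_solve s → Spec_solve s (solve s)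

-- ===== LEMMAS AND PROOFS =====

-- number of adjacent unequal pairs (proof-side helper relating both ports)
def pvPairs (u : List Char) : Int :=
  ((u.zip u.tail).filter (fun p => p.1 ≠ p.2)).length

theorem pvPairs_nil : pvPairs [] = 0 := rfl

theorem pvPairs_single (a : Char) : pvPairs [a] = 0 := rfl

theorem pvPairs_cons_cons (a b : Char) (l : List Char) :
    pvPairs (a :: b :: l) = (if a ≠ b then 1 else 0) + pvPairs (b :: l) := by
  simp only [pvPairs, List.zip_cons_cons, List.tail_cons, List.filter_cons]
  by_cases h : a = b
  · simp [h]
  · simp [h]; ring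

theorem pvPairs_append_single (w : List Char) (a : Char) :
    pvPairs (w ++ [a]) =
      pvPairs w + (match w.getLast? with
                   | none => 0
                   | some b => if b ≠ a then 1 else 0) := by
  induction w with
  | nil => simp [pvPairs_nil, pvPairs_single]
  | cons b w ih =>
    cases w with
    | nil =>
      simp [pvPairs_single, pvPairs_cons_cons]
    | cons c w' =>
      show pvPairs (b :: c :: (w' ++ [a])) = _
      rw [pvPairs_cons_cons b c (w' ++ [a])]
      have ih' : pvPairs (c :: (w' ++ [a])) = pvPairs (c :: w') +
          (match (c :: w').getLast? with
           | none => 0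
           | some b => if b ≠ a then 1 else 0) := by
        simpa using ih
      rw [ih', pvPairs_cons_cons]
      simp only [List.getLast?_cons_cons]
      ring

theorem pvPairs_reverse (u : List Char) : pvPairs u.reverse = pvPairs u := by
  induction u with
  | nil => rfl
  | cons a v ih =>
    rw [List.reverse_cons, pvPairs_append_single, ih]
    cases v with
    | nil => simp [pvPairs_single, pvPairs_nil]
    | cons b v' =>
      rw [pvPairs_cons_cons]
      simp only [List.getLast?_reverse, List.head?_cons]
      by_cases h : a = b
      · simp [h]
      · have h' : ¬ b = a := fun e => h e.symm
        simp only [h, h', ne_eq, not_false_iff, if_true]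
        ring

-- A's first loop computes (length of rstripped prefix) - 1
theorem solveStrip_eq (l : List Char) (n : Nat) (hn : n ≤ l.length) :
    solveStrip l n = (((l.take n).reverse.dropWhile (· == '+')).reverse.length : Int) - 1 := by
  induction n with
  | zero => simp [solveStrip]
  | succ m ih =>
    have hm : m < l.length := hn
    have hget : PySem.List.pyGet? l (m : Int) = l[m]? := by
      simp [PySem.List.pyGet?_natCast]
    have htake : l.take (m + 1) = l.take m ++ [l[m]] := by
      rw [List.take_add_one, List.getElem?_eq_getElem hm]; rfl
    rw [solveStrip, hget, List.getElem?_eq_getElem hm]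
    by_cases hp : l[m] = '+'
    · rw [if_pos (by rw [hp]), ih (Nat.le_of_lt hm), htake, hp]
      simp
    · have hps : ¬ (some l[m] = some '+') := by simpa using hp
      rw [if_neg hps, htake, List.reverse_append]
      have hpb : (l[m] == '+') = false := by simpa using hp
      simp only [List.reverse_cons, List.reverse_nil, List.nil_append,
        List.singleton_append, List.dropWhile_cons, hpb, Bool.false_eq_true,
        if_false, List.reverse_cons, List.length_append, List.length_reverse,
        List.length_take, List.length_cons]
      have : m ≤ l.length := Nat.le_of_lt hm
      simp [Nat.min_eq_left this]

-- A's second loop adds to ans the right-to-left transition count over l.take n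
theorem solveCount_eq (l : List Char) (n : Nat) (hn : n ≤ l.length) :
    ∀ (c : Char) (ans : Int),
      solveCount l c ans n = ans + pvPairs (c :: (l.take n).reverse) := by
  induction n with
  | zero => intro c ans; simp [solveCount, pvPairs_single]
  | succ m ih =>
    intro c ans
    have hm : m < l.length := hn
    have hget : PySem.List.pyGet? l (m : Int) = l[m]? := by
      simp [PySem.List.pyGet?_natCast]
    have htake : (l.take (m + 1)).reverse = l[m] :: (l.take m).reverse := by
      rw [List.take_add_one, List.getElem?_eq_getElem hm]
      simp
    rw [solveCount, hget, List.getElem?_eq_getElem hm, htake,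
      pvPairs_cons_cons c l[m] (l.take m).reverse]
    show (if c ≠ l[m] then solveCount l l[m] (ans + 1) m else solveCount l c ans m) = _
    by_cases h : c = l[m]
    · rw [if_neg (by simpa using h), ih (Nat.le_of_lt hm) c ans, h]
      simp
    · rw [if_pos (by simpa using h), ih (Nat.le_of_lt hm) l[m] (ans + 1)]
      simp [h]
      ring

-- the stripped string is a prefix of the original, remainder all '+'
theorem pvStrip_prefix (l : List Char) :
    l = (l.reverse.dropWhile (· == '+')).reverse ++ (l.reverse.takeWhile (· == '+')).reverse := by
  have h : l.reverse.takeWhile (· == '+') ++ l.reverse.dropWhile (· == '+') = l.reverse :=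
    List.takeWhile_append_dropWhile
  have h2 := congrArg List.reverse h
  rw [List.reverse_append, List.reverse_reverse] at h2
  exact h2.symm

-- A's value, characterised via the stripped prefix t
theorem solve_eq_pairs (s : String) :
    solve s =
      (if ((s.toList.reverse.dropWhile (· == '+')).reverse : List Char) = [] then 0
       else 1 + pvPairs (s.toList.reverse.dropWhile (· == '+')).reverse) := by
  set l := s.toList with hl
  set t := (l.reverse.dropWhile (· == '+')).reverse with ht
  have hstrip : solveStrip l l.length = (t.length : Int) - 1 := by
    rw [solveStrip_eq l l.length le_rfl, List.take_length]
  have hld : l = t ++ (l.reverse.takeWhile (· == '+')).reverse := pvStrip_prefix l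
  have htlen : t.length ≤ l.length := by rw [hld]; simp
  show (let l' := s.toList
    let i := solveStrip l' l'.length
    if i < 0 then 0
    else match PySem.List.pyGet? l' i with
      | none => 0
      | some c => solveCount l' c 1 (i.toNat + 1)) = _
  simp only []
  rw [← hl, hstrip]
  rcases List.eq_nil_or_concat t with htn | ⟨w, a, hwa⟩
  · rw [htn]; simp
  · have htne : t ≠ [] := by rw [hwa]; simp
    have hpos : 0 < t.length := List.length_pos_of_ne_nil htne
    have hnlt : ¬ ((t.length : Int) - 1 < 0) := by omega
    rw [if_neg hnlt, if_neg htne]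
    have hidx' : t.length - 1 < t.length := by omega
    have hcast : ((t.length : Int) - 1) = ((t.length - 1 : Nat) : Int) := by omega
    have hget : PySem.List.pyGet? l ((t.length : Int) - 1) = some t[t.length - 1] := by
      rw [hcast]
      have := PySem.List.pyGet?_natCast l (t.length - 1)
      rw [this]
      conv_lhs => rw [hld]
      rw [List.getElem?_append_left hidx', List.getElem?_eq_getElem hidx']
    rw [hget]
    show solveCount l t[t.length - 1] 1 ((((t.length : Int) - 1)).toNat + 1) = _
    have htoNat : ((t.length : Int) - 1).toNat + 1 = t.length := by omega
    rw [htoNat]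
    have htake : l.take t.length = t := by conv_lhs => rw [hld, List.take_left]
    rw [solveCount_eq l t.length htlen t[t.length - 1] 1, htake]
    have hrevrw : t.reverse = a :: w.reverse := by rw [hwa]; simp
    have hlast : t[t.length - 1] = a := by
      have h1 : t.getLast? = some a := by rw [hwa]; simp
      have h2 : t.getLast? = some (t.getLast htne) := List.getLast?_eq_some_getLast htne
      rw [← List.getLast_eq_getElem (h := htne)]
      exact (Option.some.inj (h2.symm.trans h1))
    have hrev : t[t.length - 1] :: t.reverse.tail = t.reverse := by
      rw [hrevrw, hlast, List.tail_cons]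
    have hdup : pvPairs (t[t.length - 1] :: t.reverse) = pvPairs t.reverse := by
      conv_rhs => rw [← hrev]
      rw [← hrev, pvPairs_cons_cons]
      simp
    rw [hdup, pvPairs_reverse]

-- ---- B-side lemmas about the run-head stack ----
def pvCompress (u : List Char) : List Char := u.foldl compressStep []

theorem pvCompress_append_single (u : List Char) (a : Char) :
    pvCompress (u ++ [a]) = compressStep (pvCompress u) a := by
  simp [pvCompress, List.foldl_append]

theorem pvCompress_getLast? (u : List Char) :
    (pvCompress u).getLast? = u.getLast? := by
  induction u using List.reverseRecOn with
  | nil => rfl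
  | append_singleton w a ih =>
    rw [pvCompress_append_single, compressStep]
    by_cases h : (pvCompress w).getLast? = some a
    · rw [if_pos h, h]; simp
    · rw [if_neg h]; simp

theorem pvCompress_length (u : List Char) (hu : u ≠ []) :
    ((pvCompress u).length : Int) = 1 + pvPairs u := by
  induction u using List.reverseRecOn with
  | nil => exact absurd rfl hu
  | append_singleton w a ih =>
    by_cases hwne : w = []
    · subst hwne
      show ((pvCompress ([] ++ [a])).length : Int) = 1 + pvPairs [a]
      rw [pvCompress_append_single]
      show ((compressStep [] a).length : Int) = 1 + pvPairs [a]
      rw [compressStep]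
      simp [pvPairs_single]
    · rw [pvCompress_append_single, pvPairs_append_single, compressStep,
        pvCompress_getLast?]
      obtain ⟨b, hb⟩ : ∃ b, w.getLast? = some b :=
        Option.isSome_iff_exists.mp (List.getLast?_isSome.mpr hwne)
      rw [hb]
      by_cases hba : b = a
      · rw [if_pos (by rw [hba]), ih hwne]
        simp [hba]
      · rw [if_neg (by simpa using hba)]
        simp only [List.length_append, List.length_cons, List.length_nil]
        push_cast
        rw [ih hwne]
        simp [hba]
        ring

theorem pvCompress_plusses (t d : List Char) (hT : t.getLast? ≠ some '+')
    (hd : ∀ x ∈ d, x = '+') :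
    pvCompress (t ++ d) = pvCompress t ++ (if d = [] then [] else ['+']) := by
  induction d using List.reverseRecOn with
  | nil => simp
  | append_singleton d₀ x ih =>
    have hx : x = '+' := hd x (by simp)
    have hd₀ : ∀ y ∈ d₀, y = '+' := fun y hy => hd y (by simp [hy])
    rcases eq_or_ne d₀ [] with h | h
    · subst h
      simp only [List.nil_append]
      rw [pvCompress_append_single, hx, compressStep, pvCompress_getLast?, if_neg hT]
      simp
    · rw [← List.append_assoc, pvCompress_append_single, ih hd₀, if_neg h, hx, compressStep]
      simp

-- the stripped prefix never ends in '+'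
theorem pvStrip_getLast? (l : List Char) :
    ((l.reverse.dropWhile (· == '+')).reverse : List Char).getLast? ≠ some '+' := by
  rw [List.getLast?_reverse]
  intro h
  have := List.head?_dropWhile_not (· == '+') l.reverse
  rw [h] at this
  simp at this

theorem solve_eq_alt (s : String) : solve s = solve_alt s := by
  set l := s.toList with hl
  set t := (l.reverse.dropWhile (· == '+')).reverse with ht
  set d := (l.reverse.takeWhile (· == '+')).reverse with hd
  have hld : l = t ++ d := pvStrip_prefix l
  have hdall : ∀ x ∈ d, x = '+' := by
    intro x hx
    rw [hd, List.mem_reverse] at hx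
    have := List.mem_takeWhile_imp hx
    simpa using this
  have hT : t.getLast? ≠ some '+' := pvStrip_getLast? l
  have hcomp : pvCompress l = pvCompress t ++ (if d = [] then [] else ['+']) := by
    conv_lhs => rw [hld]
    exact pvCompress_plusses t d hT hdall
  rw [solve_eq_pairs, ← ht]
  show _ = (let comp := s.toList.foldl compressStep []
            let comp' := if comp.getLast? = some '+' then comp.dropLast else comp
            (comp'.length : Int))
  simp only []
  rw [← hl]
  have hfold : l.foldl compressStep [] = pvCompress l := rfl
  rw [hfold, hcomp]
  rcases eq_or_ne t [] with htn | htne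
  · -- all of l is '+' (or empty): result 0 on both sides
    rw [if_pos htn, htn]
    rcases eq_or_ne d [] with hdn | hdne
    · simp [hdn, pvCompress]
    · simp [if_neg hdne, pvCompress]
  · rw [if_neg htne]
    have hlen := pvCompress_length t htne
    rcases eq_or_ne d [] with hdn | hdne
    · rw [hdn, if_pos rfl, List.append_nil, pvCompress_getLast?, if_neg hT, hlen]
    · rw [if_neg hdne, List.getLast?_concat, if_pos rfl, List.dropLast_concat, hlen]

-- ===== VERDICT (by name: the statement is the Claim_ definition above) =====
theorem solve_spec : Claim_equal_solve := by
  intro s _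
  show solve s = solve_alt s
  exact solve_eq_alt s
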